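-- pv_equiv track=rewrite | github.com/KienHoSD/UIT-homework | coding_beginner(NMLT)/maso.py | validPermutations
-- ===== SOURCE A (Python) =====
-- def validPermutations(str):
--     m = {}
--
--     # Creating count which is equal to the
--     # Total number of characters present and
--     # ans that will store the number of unique
--     # permutations
--     count = len(str)
--     ans = 0
--
--     # Storing frequency of each character
--     # present in the string
--     for i in range(len(str)):
--         if(str[i] in m):
--             m[str[i]] += 1
--         else:
--             m[str[i]] = 1
--     for i in range(len(str)):
--
--         # Adding count of characters by excluding
--         # characters equal to current char
--         ans += count - m[str[i]]
--
--         # Reduce the frequency of the current character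
--         # and count by 1, so that it cannot interfere
--         # with the calculations of the same elements
--         # present to the right of it.
--         m[str[i]] -= 1
--         count -= 1
--
--     # Return ans+1 (Because the given string
--     # is also a unique permutation)
--     return ans + 1
-- ===== SOURCE B (Python) =====
-- def validPermutations(str):
--     n = len(str)
--     freq = {}
--     for ch in str:
--         freq[ch] = freq.get(ch, 0) + 1
--     return n * (n - 1) // 2 - sum(f * (f - 1) // 2 for f in freq.values()) + 1
-- ===== Notes on version B (the rewrite author's own statement) =====
-- stated objective: faster
-- what changed: Replaces the decrementing second pass (ans += count - m[c] per character) with the closed-form combinatorial identity: unequal ordered pairs = n*(n-1)//2 minus sum of f*(f-1)//2 over character frequencies, computed in one pass over the frequency table.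
import Mathlib
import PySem

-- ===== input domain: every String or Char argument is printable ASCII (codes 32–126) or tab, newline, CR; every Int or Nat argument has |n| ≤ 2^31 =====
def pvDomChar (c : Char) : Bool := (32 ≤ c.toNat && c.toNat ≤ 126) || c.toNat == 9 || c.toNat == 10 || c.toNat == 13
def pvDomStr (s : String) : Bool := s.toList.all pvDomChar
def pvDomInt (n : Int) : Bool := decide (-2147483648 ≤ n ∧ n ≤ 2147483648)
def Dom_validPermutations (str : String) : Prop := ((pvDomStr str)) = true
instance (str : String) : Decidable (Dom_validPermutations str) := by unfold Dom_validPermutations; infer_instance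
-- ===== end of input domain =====

-- B replaces A's decrementing second pass with the closed-form count n*(n-1)//2 - Σ f*(f-1)//2 + 1 over the frequency table (same result, one arithmetic pass over the distinct characters instead of a stateful pass over all of them).

-- ===== PORT A =====
def validPermutations (str : String) : Int :=
  let s := str.toList
  -- first loop: build the frequency dict m
  let m : PySem.Dict Char Int :=
    (PySem.List.pyRange 0 (s.length : Int) 1).foldl
      (fun d i =>
        let c := PySem.List.pyGetD s i ' '
        if d.contains c then d.insert c (d.getD c 0 + 1) else d.insert c 1)
      PySem.Dict.empty
  -- second loop over (m, count, ans); m[str[i]] is always present, ported as getD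
  let r :=
    (PySem.List.pyRange 0 (s.length : Int) 1).foldl
      (fun (st : PySem.Dict Char Int × Int × Int) i =>
        let c := PySem.List.pyGetD s i ' '
        (st.1.insert c (st.1.getD c 0 - 1), st.2.1 - 1, st.2.2 + (st.2.1 - st.1.getD c 0)))
      (m, (s.length : Int), 0)
  r.2.2 + 1

-- ===== PORT B =====
def validPermutations_alt (str : String) : Int :=
  let s := str.toList
  let n : Int := s.length
  let freq : PySem.Dict Char Int :=
    s.foldl (fun d c => d.insert c (d.getD c 0 + 1)) PySem.Dict.empty
  PySem.Int.floordiv (n * (n - 1)) 2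
    - (freq.values.map (fun f => PySem.Int.floordiv (f * (f - 1)) 2)).sum + 1

-- ===== PRECONDITION & SPEC =====
def Spec_validPermutations (str : String) (out : Int) : Prop := out = validPermutations_alt str
instance (str : String) (out : Int) : Decidable (Spec_validPermutations str out) := by unfold Spec_validPermutations; infer_instance

-- ===== CLAIM (what is proved, stated in full; the proofs are below) =====
def Claim_equal_validPermutations : Prop := ∀ (str : String), Dom_validPermutations str → Spec_validPermutations str (validPermutations str)

-- ===== LEMMAS AND PROOFS =====

/-- The value accumulated by A's second loop: for each position, the number of
later positions holding a different character. -/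
def pvU : List Char → Int
  | [] => 0
  | c :: t => ((t.length : Int) - (t.count c : Int)) + pvU t

/-- floor-division form of `choose 2` on a natural number. -/
lemma pv_floordiv_choose (m : Nat) :
    PySem.Int.floordiv ((m : Int) * ((m : Int) - 1)) 2 = (m.choose 2 : Int) := by
  cases m with
  | zero => decide
  | succ k =>
      have h1 : ((k + 1 : Nat) : Int) * (((k + 1 : Nat) : Int) - 1)
          = (((k + 1) * k : Nat) : Int) := by push_cast; ring
      rw [h1]
      rw [show (2 : Int) = ((2 : Nat) : Int) from rfl, PySem.Int.floordiv_natCast]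
      congr 1
      rw [Nat.choose_two_right]
      simp

/-- A's first loop (with its membership test) builds exactly `Dict.counter`. -/
lemma pv_count_loop (l : List Char) :
    l.foldl
      (fun (d : PySem.Dict Char Int) c =>
        if d.contains c then d.insert c (d.getD c 0 + 1) else d.insert c 1)
      PySem.Dict.empty = PySem.Dict.counter l := by
  have hf : (fun (d : PySem.Dict Char Int) c =>
        if d.contains c then d.insert c (d.getD c 0 + 1) else d.insert c 1)
      = fun (d : PySem.Dict Char Int) c => d.insert c (d.getD c 0 + 1) := by
    funext d c
    by_cases h : d.contains c
    · simp [h]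
    · have h0 : d.getD c 0 = 0 := PySem.Dict.getD_of_not_contains d 0 (by simpa using h)
      simp [h, h0]
  rw [hf, PySem.Dict.foldl_insert_getD_add_one_eq_counter]

/-- Invariant of A's second loop: if the dict holds the counts of the remaining
suffix and `count` its length, the accumulator gains `pvU`. -/
lemma pv_loopA (l : List Char) : ∀ (m : PySem.Dict Char Int) (count ans : Int),
    (∀ c ∈ l, m.getD c 0 = (l.count c : Int)) → count = (l.length : Int) →
    (l.foldl
      (fun (st : PySem.Dict Char Int × Int × Int) c =>
        (st.1.insert c (st.1.getD c 0 - 1), st.2.1 - 1, st.2.2 + (st.2.1 - st.1.getD c 0)))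
      (m, count, ans)).2.2 = ans + pvU l := by
  induction l with
  | nil => intro m count ans _ _; simp [pvU]
  | cons c t ih =>
      intro m count ans hm hc
      have hmc : m.getD c 0 = ((t.count c : Int) + 1) := by
        have := hm c (List.mem_cons_self)
        simpa [List.count_cons_self] using this
      simp only [List.foldl_cons]
      rw [ih (m.insert c (m.getD c 0 - 1)) (count - 1) (ans + (count - m.getD c 0)) ?_ ?_]
      · rw [pvU]
        have hlen : count = ((t.length : Int) + 1) := by simpa using hc
        rw [hmc, hlen]; ring
      · intro d hd
        rw [PySem.Dict.getD_insert]
        by_cases hdc : d = c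
        · subst hdc; rw [if_pos rfl, hmc]; ring
        · rw [if_neg hdc]
          have hcd : ¬ c = d := fun h => hdc h.symm
          have := hm d (List.mem_cons_of_mem _ hd)
          simpa [List.count_cons, hcd] using this
      · rw [hc, List.length_cons]; push_cast; ring

/-- The combinatorial identity behind B: pvU l = C(n,2) - Σ_{distinct c} C(count c, 2). -/
lemma pv_key (l : List Char) :
    pvU l = (l.length.choose 2 : Int) - ∑ k ∈ l.toFinset, ((l.count k).choose 2 : Int) := by
  induction l with
  | nil => simp [pvU]
  | cons c t ih =>
      have hpoint : ∀ k : Char, (((c :: t).count k).choose 2 : Int)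
          = ((t.count k).choose 2 : Int) + (if k = c then (t.count c : Int) else 0) := by
        intro k
        by_cases hk : k = c
        · subst hk
          rw [if_pos rfl, List.count_cons_self]
          have : (t.count k + 1).choose 2 = t.count k + (t.count k).choose 2 := by
            rw [Nat.choose_succ_succ']
            simp [Nat.choose_one_right]
          rw [this]; push_cast; ring
        · have hcnt : List.count k (c :: t) = List.count k t := by
            simp [show ¬c = k from fun h => hk h.symm]
          rw [if_neg hk, hcnt]; ring
      have hsum : ∑ k ∈ (c :: t).toFinset, (((c :: t).count k).choose 2 : Int)
          = (∑ k ∈ (c :: t).toFinset, ((t.count k).choose 2 : Int)) + (t.count c : Int) := by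
        rw [Finset.sum_congr rfl (fun k _ => hpoint k), Finset.sum_add_distrib]
        congr 1
        rw [Finset.sum_ite_eq']
        simp [List.toFinset_cons]
      have hlen : ((c :: t).length.choose 2 : Int)
          = (t.length : Int) + (t.length.choose 2 : Int) := by
        have : (t.length + 1).choose 2 = t.length + t.length.choose 2 := by
          rw [Nat.choose_succ_succ']
          simp [Nat.choose_one_right]
        simp only [List.length_cons, this]; push_cast; ring
      by_cases hc : c ∈ t
      · have hins : (c :: t).toFinset = t.toFinset := by
          simp [List.toFinset_cons, hc]
        rw [pvU, ih, hsum, hins, hlen]; ring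
      · have hc' : c ∉ t.toFinset := by simpa using hc
        have hcount : (t.count c : Int) = 0 := by
          simp [List.count_eq_zero_of_not_mem hc]
        have hins : ∑ k ∈ (c :: t).toFinset, ((t.count k).choose 2 : Int)
            = ((t.count c).choose 2 : Int) + ∑ k ∈ t.toFinset, ((t.count k).choose 2 : Int) := by
          rw [List.toFinset_cons, Finset.sum_insert hc']
        rw [pvU, ih, hsum, hins, hlen]
        have : ((t.count c).choose 2 : Int) = 0 := by
          simp [List.count_eq_zero_of_not_mem hc]
        rw [this, hcount]; ring

/-- B's value, rewritten through the counter dict, equals pvU + 1. -/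
lemma pv_alt_eq (s : List Char) :
    PySem.Int.floordiv ((s.length : Int) * ((s.length : Int) - 1)) 2
      - (((PySem.Dict.counter s (κ := Char)).values.map
            (fun f => PySem.Int.floordiv (f * (f - 1)) 2)).sum) + 1
    = pvU s + 1 := by
  have hvals : (PySem.Dict.counter s (κ := Char)).values
      = (PySem.Set.ofList s).map (fun k => (s.count k : Int)) := by
    show ((PySem.Dict.counter s (κ := Char)).items.map (·.2)) = _
    rw [PySem.Dict.items_counter, List.map_map]
    rfl
  rw [hvals, List.map_map]
  have hfun : ((fun f => PySem.Int.floordiv (f * (f - 1)) 2) ∘ fun k => (s.count k : Int))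
      = fun k => ((s.count k).choose 2 : Int) := by
    funext k
    exact pv_floordiv_choose (s.count k)
  rw [hfun]
  have hsum : ((PySem.Set.ofList s).map (fun k => ((s.count k).choose 2 : Int))).sum
      = ∑ k ∈ s.toFinset, ((s.count k).choose 2 : Int) := by
    have hset : (PySem.Set.ofList s).toFinset = s.toFinset := by
      apply Finset.ext
      intro x
      simp [List.mem_toFinset, PySem.Set.mem_ofList]
    rw [← hset]
    exact (List.sum_toFinset _ (PySem.Set.nodup_ofList s)).symm
  rw [hsum, pv_floordiv_choose s.length, pv_key]

-- ===== VERDICT (by name: the statement is the Claim_ definition above) =====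
theorem validPermutations_spec : Claim_equal_validPermutations := by
  intro str _
  unfold Spec_validPermutations validPermutations validPermutations_alt
  simp only []
  set s := str.toList with hs
  rw [PySem.List.foldl_pyRange_zero_pyGetD' s ' '
        (fun (d : PySem.Dict Char Int) c =>
          if d.contains c then d.insert c (d.getD c 0 + 1) else d.insert c 1)
        PySem.Dict.empty,
      PySem.List.foldl_pyRange_zero_pyGetD' s ' '
        (fun (st : PySem.Dict Char Int × Int × Int) c =>
          (st.1.insert c (st.1.getD c 0 - 1), st.2.1 - 1, st.2.2 + (st.2.1 - st.1.getD c 0)))]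
  rw [pv_count_loop s]
  rw [PySem.Dict.foldl_insert_getD_add_one_eq_counter]
  rw [pv_loopA s (PySem.Dict.counter s) (s.length : Int) 0
        (fun c _ => PySem.Dict.getD_counter s c) rfl]
  rw [pv_alt_eq s]
  ring
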